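-- pv_equiv track=rewrite | github.com/liulijun-king/liu_news | temporary_spider/tools/base_tools.py | obtin_p
-- ===== SOURCE A (Python) =====
-- def obtin_p(error_q, html):
--     html_ind = html.find("</p>")
--     first_index = 0
--     last_content = ""
--     p_index = 0
--     while html_ind != -1:
--         need_html = html[first_index:html_ind]
--         if p_index in error_q:
--             last_content += need_html
--             first_index = html_ind + 4
--         else:
--             last_content += need_html
--             first_index = html_ind
--         html_ind = html.find("</p>", html_ind + 1)
--         p_index += 1
--         if html_ind == -1:
--             last_content += html[first_index:]
--     return last_content
-- ===== SOURCE B (Python) =====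
-- def obtin_p(error_q, html):
--     # A page with no "</p>" at all yields "" (the function's contract, as in A).
--     if "</p>" not in html:
--         return ""
--     # Single left-to-right character scan: copy characters, and at each "</p>"
--     # occurrence (counted by k) either drop it (k in error_q) or re-emit it.
--     out = []
--     i = 0
--     k = 0
--     n = len(html)
--     while i < n:
--         if html.startswith("</p>", i):
--             if k not in error_q:
--                 out.append("</p>")
--             k += 1
--             i += 4
--         else:
--             out.append(html[i])
--             i += 1
--     return "".join(out)
-- ===== Notes on version B (the rewrite author's own statement) =====
-- stated objective: alternative
-- what changed: A repeatedly calls html.find('</p>') and rebuilds the page from slice offsets (first_index/html_ind bookkeeping, tail appended inside the loop); B never computes offsets of later tags: it does one character-by-character scan with startswith, copying characters and deciding drop/re-emit at each tag as it is met, keeping the contract that a page with no '</p>' yields ''.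
import Mathlib
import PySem

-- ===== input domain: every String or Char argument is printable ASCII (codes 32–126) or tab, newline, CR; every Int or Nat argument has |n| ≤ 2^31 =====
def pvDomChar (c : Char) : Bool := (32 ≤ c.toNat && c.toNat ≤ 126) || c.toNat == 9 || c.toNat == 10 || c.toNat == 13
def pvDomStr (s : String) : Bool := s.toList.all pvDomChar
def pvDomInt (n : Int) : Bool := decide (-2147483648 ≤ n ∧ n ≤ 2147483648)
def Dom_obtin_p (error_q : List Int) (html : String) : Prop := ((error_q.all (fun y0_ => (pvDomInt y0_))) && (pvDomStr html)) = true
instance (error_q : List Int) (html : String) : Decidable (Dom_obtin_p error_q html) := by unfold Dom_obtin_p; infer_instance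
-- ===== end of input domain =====

-- ===== PORT A =====
-- B replaces A's find/offset loop by a single character-by-character scan that decides
-- drop/re-emit at each "</p>" when it is met; same cost, no speed claim.
def pvTag : List Char := ['<', '/', 'p', '>']

-- literal port of A's while-loop; fuel only makes the recursion total (one find per step,
-- positions strictly increase, so h.length + 1 steps always suffice)
def obtinPLoopA (error_q : List Int) (h : List Char) :
    Nat → Int → Int → List Char → Int → List Char
  | 0, _, _, last_content, _ => last_content
  | fuel + 1, html_ind, first_index, last_content, p_index =>
    if html_ind = -1 then last_content
    else
      let need_html := PySem.Chars.slice h (some first_index) (some html_ind)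
      let st :=
        if p_index ∈ error_q then (last_content ++ need_html, html_ind + 4)
        else (last_content ++ need_html, html_ind)
      let html_ind' := PySem.Chars.findFrom h pvTag (html_ind + 1) none
      let last_content' :=
        if html_ind' = -1 then st.1 ++ PySem.Chars.slice h (some st.2) none else st.1
      obtinPLoopA error_q h fuel html_ind' st.2 last_content' (p_index + 1)

def obtin_p (error_q : List Int) (html : String) : String :=
  let h := html.toList
  String.ofList (obtinPLoopA error_q h (h.length + 1) (PySem.Chars.find h pvTag) 0 [] 0)

-- ===== PORT B =====
-- Source B's while-loop over positions i, transcribed as recursion over the suffix html[i:]: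
-- at each step either html.startswith("</p>", i) holds (emit the tag unless k in error_q,
-- advance 4) or a single character is copied.
def pvScan (error_q : List Int) : List Char → Int → List Char
  | [], _ => []
  | c :: rest, k =>
    if PySem.Chars.startswith (c :: rest) pvTag then
      (if k ∈ error_q then [] else pvTag) ++ pvScan error_q ((c :: rest).drop 4) (k + 1)
    else
      c :: pvScan error_q rest k
termination_by l _ => l.length
decreasing_by
  · simp [List.length_drop]
  · simp

def obtin_p_alt (error_q : List Int) (html : String) : String :=
  let h := html.toList
  if PySem.Chars.isIn pvTag h = false then ""
  else String.ofList (pvScan error_q h 0)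

-- ===== PRECONDITION & SPEC =====
def Spec_obtin_p (error_q : List Int) (html : String) (out : String) : Prop := out = obtin_p_alt error_q html
instance (error_q : List Int) (html : String) (out : String) : Decidable (Spec_obtin_p error_q html out) := by unfold Spec_obtin_p; infer_instance

-- ===== CLAIM (what is proved, stated in full; the proofs are below) =====
def Claim_equal_obtin_p : Prop := ∀ (error_q : List Int) (html : String), Dom_obtin_p error_q html → Spec_obtin_p error_q html (obtin_p error_q html)

-- ===== LEMMAS AND PROOFS =====
-- proof-only view of A's output: the chain of "</p>" positions, then the sliced segments
def pvPositions (h : List Char) : Nat → Int → List Int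
  | 0, _ => []
  | fuel + 1, i =>
    if i = -1 then []
    else i :: pvPositions h fuel (PySem.Chars.findFrom h pvTag (i + 1) none)

def pvR (error_q : List Int) (h : List Char) : List Int → Int → Int → List Char
  | [], _, first => PySem.Chars.slice h (some first) none
  | pos :: rest, k, first =>
    PySem.Chars.slice h (some first) (some pos) ++
      pvR error_q h rest (k + 1) (if k ∈ error_q then pos + 4 else pos)

theorem pvPositions_neg_one (h : List Char) (fuel : Nat) :
    pvPositions h fuel (-1) = [] := by
  cases fuel <;> simp [pvPositions]

theorem pvTag_length : pvTag.length = 4 := by decide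

theorem loopA_eq (error_q : List Int) (h : List Char) :
    ∀ (fuel : Nat) (i first : Int) (acc : List Char) (k : Int),
      (i = -1 ∨ (0 ≤ i ∧ pvTag <+: h.drop i.toNat ∧ h.length < fuel + i.toNat)) →
      obtinPLoopA error_q h fuel i first acc k =
        if i = -1 then acc
        else acc ++ pvR error_q h (pvPositions h fuel i) k first := by
  intro fuel
  induction fuel with
  | zero =>
    intro i first acc k hinv
    rcases hinv with hi | ⟨h0, htag, hf⟩
    · simp [obtinPLoopA, hi]
    · exfalso
      have hle := htag.length_le
      rw [List.length_drop, pvTag_length] at hle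
      omega
  | succ fuel ih =>
    intro i first acc k hinv
    by_cases hi : i = -1
    · simp [obtinPLoopA, hi]
    · rcases hinv with h' | ⟨h0, htag, hf⟩
      · exact absurd h' hi
      have hlen4 : i.toNat + 4 ≤ h.length := by
        have hle := htag.length_le
        rw [List.length_drop, pvTag_length] at hle
        omega
      have hcast : (i + 1 : Int) = ((i.toNat + 1 : Nat) : Int) := by omega
      set i' := PySem.Chars.findFrom h pvTag (i + 1) none with hi'def
      have hinv' : i' = -1 ∨ (0 ≤ i' ∧ pvTag <+: h.drop i'.toNat ∧ h.length < fuel + i'.toNat) := by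
        by_cases hi' : i' = -1
        · exact Or.inl hi'
        · right
          have hspec := PySem.Chars.findFrom_natCast_spec h pvTag (i.toNat + 1)
            (by omega) (by rw [← hcast]; exact hi')
          rw [← hcast] at hspec
          obtain ⟨hge, hpre, -⟩ := hspec
          have h0' : 0 ≤ i' := by omega
          exact ⟨h0', hpre, by omega⟩
      have hrec := ih i' (if k ∈ error_q then i + 4 else i)
        (if i' = -1 then
          (acc ++ PySem.Chars.slice h (some first) (some i)) ++
            PySem.Chars.slice h (some (if k ∈ error_q then i + 4 else i)) none
         else acc ++ PySem.Chars.slice h (some first) (some i))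
        (k + 1) hinv'
      by_cases hk : k ∈ error_q <;> by_cases hi2 : i' = -1 <;>
        (simp only [obtinPLoopA, hi, hk, hi2, ← hi'def, pvPositions, pvR,
            pvPositions_neg_one, PySem.Chars.slice_eq_listSlice, List.append_assoc,
            ite_true, ite_false] at hrec ⊢ ;
         exact hrec)

-- "</p>" has no self-overlap: two distinct occurrences are at least 4 apart
theorem occ_apart {h : List Char} {p m : Nat} (hp : pvTag <+: h.drop p)
    (hm : pvTag <+: h.drop m) (hlt : p < m) : p + 4 ≤ m := by
  by_contra hcon
  rw [not_le] at hcon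
  obtain ⟨t, ht⟩ := hp
  obtain ⟨u, hu⟩ := hm
  have hdm : h.drop m = (h.drop p).drop (m - p) := by
    rw [List.drop_drop]; congr 1; omega
  rw [hdm, ← ht] at hu
  have h1 : 1 ≤ m - p := by omega
  have h3 : m - p ≤ 3 := by omega
  interval_cases hd : (m - p) <;> simp [pvTag, List.cons_append] at hu

theorem noOcc_of_not_infix {h : List Char} {a : Nat} (hn : ¬ pvTag <:+: h.drop a) :
    ∀ m, a ≤ m → ¬ pvTag <+: h.drop m := by
  intro m ham hp
  apply hn
  rw [← PySem.Chars.isIn_iff_infix, ← PySem.Chars.exists_prefix_drop_iff_isIn]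
  refine ⟨m - a, ?_⟩
  rw [List.drop_drop, Nat.add_sub_cancel' ham]
  exact hp

theorem occ_le_length {h : List Char} {p : Nat} (hp : pvTag <+: h.drop p) :
    p + 4 ≤ h.length := by
  have hle := hp.length_le
  rw [List.length_drop, pvTag_length] at hle
  by_cases hple : p ≤ h.length <;> omega

theorem pvScan_cons (error_q : List Int) (c : Char) (rest : List Char) (k : Int) :
    pvScan error_q (c :: rest) k =
      if PySem.Chars.startswith (c :: rest) pvTag then
        (if k ∈ error_q then [] else pvTag) ++ pvScan error_q ((c :: rest).drop 4) (k + 1)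
      else c :: pvScan error_q rest k := by
  rw [pvScan]

-- the scanner copies a tag-free list unchanged
theorem scan_copy (error_q : List Int) :
    ∀ (l : List Char) (k : Int), (∀ m, ¬ pvTag <+: l.drop m) → pvScan error_q l k = l := by
  intro l
  induction l with
  | nil => intro k _; simp [pvScan]
  | cons c rest ih =>
    intro k hno
    have h0 : ¬ pvTag <+: (c :: rest) := by simpa using hno 0
    have hsw : PySem.Chars.startswith (c :: rest) pvTag = false := by
      simp only [PySem.Chars.startswith, Bool.eq_false_iff, ne_eq, List.isPrefixOf_iff_prefix]
      exact h0
    rw [pvScan_cons, if_neg (by simp [hsw])]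
    exact congrArg _ (ih k (fun m => by simpa using hno (m + 1)))

-- the scanner up to the FIRST tag occurrence: copy, decide the tag, recurse after it
theorem scan_tag (error_q : List Int) :
    ∀ (p : Nat) (l : List Char) (k : Int),
      pvTag <+: l.drop p → (∀ m, m < p → ¬ pvTag <+: l.drop m) →
      pvScan error_q l k =
        l.take p ++ (if k ∈ error_q then [] else pvTag) ++ pvScan error_q (l.drop (p + 4)) (k + 1) := by
  intro p
  induction p with
  | zero =>
    intro l k hp _
    rw [List.drop_zero] at hp
    obtain ⟨t, ht⟩ := hp
    subst ht
    have hsw : PySem.Chars.startswith (pvTag ++ t) pvTag = true := by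
      simp only [PySem.Chars.startswith, List.isPrefixOf_iff_prefix]
      exact List.prefix_append _ _
    rw [show pvTag ++ t = '<' :: ('/' :: 'p' :: '>' :: t) from by simp [pvTag]]
    rw [pvScan_cons]
    rw [if_pos (by rw [show ('<' :: ('/' :: 'p' :: '>' :: t)) = pvTag ++ t from by simp [pvTag]]; exact hsw)]
    simp [pvTag]
  | succ p ih =>
    intro l k hp hmin
    match l with
    | [] => rw [List.drop_nil] at hp; simp [pvTag] at hp
    | c :: rest =>
      have h0 : ¬ pvTag <+: (c :: rest) := by simpa using hmin 0 (by omega)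
      have hsw : PySem.Chars.startswith (c :: rest) pvTag = false := by
        simp only [PySem.Chars.startswith, Bool.eq_false_iff, ne_eq, List.isPrefixOf_iff_prefix]
        exact h0
      have hrec := ih rest k (by simpa using hp)
        (fun m hm => by simpa using hmin (m + 1) (by omega))
      rw [pvScan_cons, if_neg (by simp [hsw]), hrec]
      simp only [List.take_succ_cons, List.drop_succ_cons, List.cons_append]

-- re-emitting a kept tag: pvR from the tag position = the tag itself ++ pvR from after it
theorem pvR_pad (error_q : List Int) (h : List Char) (ps : List Int) (k : Int) (p : Nat)
    (hocc : pvTag <+: h.drop p)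
    (hps : ps = [] ∨ ∃ (p1 : Nat) (rest : List Int), ps = (↑p1) :: rest ∧ p + 4 ≤ p1) :
    pvR error_q h ps k ↑p = pvTag ++ pvR error_q h ps k ↑(p + 4) := by
  obtain ⟨t, ht⟩ := hocc
  have hdrop4 : h.drop (p + 4) = t := by
    have : h.drop (p + 4) = (h.drop p).drop 4 := by rw [List.drop_drop]
    rw [this, ← ht]
    simp [pvTag]
  rcases hps with rfl | ⟨p1, rest, rfl, hle⟩
  · simp only [pvR, PySem.Chars.slice_eq_listSlice, PySem.List.slice_from_natCast]
    rw [← ht, hdrop4]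
  · have key : List.take (p1 - p) (List.drop p h) =
        pvTag ++ List.take (p1 - (p + 4)) (List.drop (p + 4) h) := by
      rw [← ht, hdrop4, List.take_append,
        List.take_of_length_le (by rw [pvTag_length]; omega), pvTag_length, Nat.sub_sub]
    simp only [pvR, PySem.Chars.slice_eq_listSlice, PySem.List.slice_natCast, key,
      List.append_assoc]

-- MAIN: A's slice-rebuild over the position chain = B's scan of the suffix
theorem pvR_eq_scan (error_q : List Int) (h : List Char) :
    ∀ (fuel : Nat) (i : Int) (j : Nat) (k : Int),
      j ≤ h.length →
      (i = -1 → ∀ m, j ≤ m → ¬ pvTag <+: h.drop m) →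
      (i ≠ -1 → ∃ p : Nat, i = ↑p ∧ pvTag <+: h.drop p ∧ j ≤ p ∧
          (∀ m, j ≤ m → m < p → ¬ pvTag <+: h.drop m) ∧ h.length < fuel + p) →
      pvR error_q h (pvPositions h fuel i) k ↑j = pvScan error_q (h.drop j) k := by
  intro fuel
  induction fuel with
  | zero =>
    intro i j k hj hneg hpos
    by_cases hi : i = -1
    · subst hi
      rw [pvPositions_neg_one]
      simp only [pvR, PySem.Chars.slice_eq_listSlice, PySem.List.slice_from_natCast]
      exact (scan_copy error_q (h.drop j) k (fun m hp => (hneg rfl (j + m) (by omega))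
        (by rwa [List.drop_drop] at hp))).symm
    · obtain ⟨p, -, hocc, -, -, hf⟩ := hpos hi
      have := occ_le_length hocc
      omega
  | succ fuel ih =>
    intro i j k hj hneg hpos
    by_cases hi : i = -1
    · subst hi
      rw [pvPositions_neg_one]
      simp only [pvR, PySem.Chars.slice_eq_listSlice, PySem.List.slice_from_natCast]
      exact (scan_copy error_q (h.drop j) k (fun m hp => (hneg rfl (j + m) (by omega))
        (by rwa [List.drop_drop] at hp))).symm
    · obtain ⟨p, rfl, hocc, hjp, hminp, hf⟩ := hpos hi
      have hp4 : p + 4 ≤ h.length := occ_le_length hocc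
      -- the scanner's view of the suffix h.drop j
      have hdrop : (h.drop j).drop (p - j) = h.drop p := by
        rw [List.drop_drop]; congr 1; omega
      have hscan := scan_tag error_q (p - j) (h.drop j) k
        (by rw [hdrop]; exact hocc)
        (fun m hm hp' => hminp (j + m) (by omega) (by omega)
          (by rwa [List.drop_drop] at hp'))
      have hdrop2 : (h.drop j).drop (p - j + 4) = h.drop (p + 4) := by
        rw [List.drop_drop]; congr 1; omega
      rw [hdrop2] at hscan
      -- the next position
      set i' := PySem.Chars.findFrom h pvTag ((p : Int) + 1) none with hi'def
      have hcast : ((p : Int) + 1) = ((p + 1 : Nat) : Int) := by push_cast; ring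
      have hnext_neg : i' = -1 → ∀ m, p + 4 ≤ m → ¬ pvTag <+: h.drop m := by
        intro hn m hm
        rw [hi'def, hcast] at hn
        have := (PySem.Chars.findFrom_natCast_eq_neg_one_iff h pvTag (p + 1) (by omega)).mp hn
        exact noOcc_of_not_infix this m (by omega)
      have hnext_pos : i' ≠ -1 → ∃ p' : Nat, i' = ↑p' ∧ pvTag <+: h.drop p' ∧ p + 4 ≤ p' ∧
          (∀ m, p + 4 ≤ m → m < p' → ¬ pvTag <+: h.drop m) ∧ h.length < fuel + p' := by
        intro hn
        have hspec := PySem.Chars.findFrom_natCast_spec h pvTag (p + 1) (by omega)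
          (by rwa [← hcast])
        rw [← hcast] at hspec
        obtain ⟨hge, hpre, hmin⟩ := hspec
        refine ⟨i'.toNat, by omega, hpre, ?_, ?_, by omega⟩
        · have := occ_apart hocc hpre (by omega)
          omega
        · intro m hm hlt
          exact hmin m (by omega) hlt
      have hIH := ih i' (p + 4) (k + 1) hp4 hnext_neg hnext_pos
      -- shape of the rest of the position chain, for pvR_pad
      have hshape : pvPositions h fuel i' = [] ∨
          ∃ (p1 : Nat) (rest : List Int), pvPositions h fuel i' = (↑p1) :: rest ∧ p + 4 ≤ p1 := by
        by_cases hn : i' = -1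
        · left; rw [hn, pvPositions_neg_one]
        · obtain ⟨p', hp', -, hle', -, -⟩ := hnext_pos hn
          cases fuel with
          | zero => left; simp [pvPositions]
          | succ fuel' =>
            right
            exact ⟨p', pvPositions h fuel' (PySem.Chars.findFrom h pvTag (i' + 1) none),
              by rw [pvPositions]; rw [if_neg hn, hp'], hle'⟩
      -- assemble
      rw [hscan]
      show pvR error_q h (pvPositions h (fuel + 1) ((p : Int))) k ↑j = _
      rw [pvPositions]
      rw [if_neg hi]
      simp only [pvR, ← hi'def]
      rw [PySem.Chars.slice_eq_listSlice, PySem.List.slice_natCast]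
      by_cases hk : k ∈ error_q
      · rw [if_pos hk, if_pos hk]
        have : ((p : Int) + 4) = ((p + 4 : Nat) : Int) := by push_cast; ring
        rw [this, hIH]
        simp [List.append_assoc]
      · rw [if_neg hk, if_neg hk]
        rw [pvR_pad error_q h _ (k + 1) p hocc hshape, hIH]
        simp [List.append_assoc]

-- ===== VERDICT (by name: the statement is the Claim_ definition above) =====
theorem obtin_p_spec : Claim_equal_obtin_p := by
  intro error_q html _
  unfold Spec_obtin_p obtin_p obtin_p_alt
  by_cases hi0 : PySem.Chars.find html.toList pvTag = -1
  · have hin : PySem.Chars.isIn pvTag html.toList = false := by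
      rw [PySem.Chars.isIn_eq_false_iff, ← PySem.Chars.find_eq_neg_one_iff]
      exact hi0
    simp [hi0, hin, obtinPLoopA]
  · have hin : PySem.Chars.isIn pvTag html.toList ≠ false := by
      rw [ne_eq, PySem.Chars.isIn_eq_false_iff, ← PySem.Chars.find_eq_neg_one_iff]
      simpa using hi0
    have h0 : 0 ≤ PySem.Chars.find html.toList pvTag := by
      have := PySem.Chars.neg_one_le_find html.toList pvTag
      omega
    obtain ⟨htag, hmin⟩ := PySem.Chars.find_spec h0
    have hA := loopA_eq error_q html.toList (html.toList.length + 1)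
      (PySem.Chars.find html.toList pvTag) 0 [] 0 (Or.inr ⟨h0, htag, by omega⟩)
    have hB := pvR_eq_scan error_q html.toList (html.toList.length + 1)
      (PySem.Chars.find html.toList pvTag) 0 0 (by omega)
      (fun hn => absurd hn hi0)
      (fun _ => ⟨(PySem.Chars.find html.toList pvTag).toNat, by omega, htag, by omega,
        fun m _ hm => hmin m hm, by omega⟩)
    simp only [List.drop_zero, Nat.cast_zero] at hB
    simp only [hA, if_neg hi0, List.nil_append, if_neg hin, hB]
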